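-- pv_equiv track=rewrite | github.com/weifu1997/daily_stock_analysis | src/analysis/normalization/service.py | _diff_paths
-- ===== SOURCE A (Python) =====
-- from typing import Any, List, Optional, Protocol, TYPE_CHECKING
--
-- def _diff_paths(before: Any, after: Any, prefix: str = "") -> List[str]:
--     paths: List[str] = []
--     if isinstance(before, dict) and isinstance(after, dict):
--         keys = set(before) | set(after)
--         for key in sorted(keys):
--             new_prefix = f"{prefix}.{key}" if prefix else key
--             if key not in before or key not in after:
--                 paths.append(new_prefix)
--                 continue
--             paths.extend(_diff_paths(before[key], after[key], new_prefix))
--         return paths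
--     if before != after:
--         paths.append(prefix)
--     return paths
-- ===== SOURCE B (Python) =====
-- from typing import Any, List
--
--
-- def _diff_paths(before: Any, after: Any, prefix: str = "") -> List[str]:
--     if not (isinstance(before, dict) and isinstance(after, dict)):
--         return [prefix] if before != after else []
--     ka, kb = sorted(before), sorted(after)
--     out: List[str] = []
--     i = j = 0
--     while i < len(ka) or j < len(kb):
--         if j == len(kb) or (i < len(ka) and ka[i] < kb[j]):
--             out.append(f"{prefix}.{ka[i]}" if prefix else ka[i])
--             i += 1
--         elif i == len(ka) or kb[j] < ka[i]:
--             out.append(f"{prefix}.{kb[j]}" if prefix else kb[j])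
--             j += 1
--         else:
--             k = ka[i]
--             new_prefix = f"{prefix}.{k}" if prefix else k
--             out.extend(_diff_paths(before[k], after[k], new_prefix))
--             i += 1
--             j += 1
--     return out
-- ===== Notes on version B (the rewrite author's own statement) =====
-- stated objective: alternative
-- what changed: Instead of sorting the union of the two key sets and membership-testing every key in both dicts, B sorts each dict's keys separately and walks the two sorted lists with a two-pointer merge, emitting only-left/only-right keys directly and recursing only where the key is present on both sides.
import Mathlib
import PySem

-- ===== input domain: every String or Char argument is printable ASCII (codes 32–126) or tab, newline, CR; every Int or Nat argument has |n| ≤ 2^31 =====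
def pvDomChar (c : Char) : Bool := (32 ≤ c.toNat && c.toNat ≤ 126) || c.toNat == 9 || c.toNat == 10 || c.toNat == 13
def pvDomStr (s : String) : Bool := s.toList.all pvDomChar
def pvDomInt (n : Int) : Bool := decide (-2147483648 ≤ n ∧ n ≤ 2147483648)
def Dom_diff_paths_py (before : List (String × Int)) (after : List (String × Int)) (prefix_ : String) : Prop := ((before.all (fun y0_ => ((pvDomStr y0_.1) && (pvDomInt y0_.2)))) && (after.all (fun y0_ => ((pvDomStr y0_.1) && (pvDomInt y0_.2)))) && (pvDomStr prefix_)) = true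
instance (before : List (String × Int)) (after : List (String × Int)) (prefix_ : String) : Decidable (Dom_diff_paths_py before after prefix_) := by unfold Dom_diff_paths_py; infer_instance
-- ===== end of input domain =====

-- B replaces A's "sort the union of the key sets, then membership-test each key in both dicts"
-- by a two-pointer merge of the two sorted key lists (objective: alternative; same asymptotic cost).
-- Both programs are pure (no argument is mutated).

-- ===== PORT A =====
-- f"{prefix}.{key}" if prefix else key  (shared by both ports: both Pythons build paths this way)
def pvPath (p k : String) : String := if p ≠ "" then p ++ "." ++ k else k

-- the recursive call _diff_paths(before[key], after[key], new_prefix) specialised to the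
-- int leaves of this task's domain: not dicts, so it is `[prefix] if before != after else []`
-- (shared by both ports: both Pythons make this same recursive call on the two leaf values)
def pvLeafDiff (b a : Int) (p : String) : List String :=
  if b ≠ a then [p] else []

def diff_paths_py (before : List (String × Int)) (after : List (String × Int)) (prefix_ : String) : List String :=
  let db := PySem.Dict.ofList before
  let da := PySem.Dict.ofList after
  -- keys = set(before) | set(after)
  let keys := (PySem.Set.ofList db.keys).union (PySem.Set.ofList da.keys)
  -- for key in sorted(keys): …  (appends ported as acc ++ ·)
  (PySem.List.sorted keys (fun k => k)).foldl
    (fun paths key =>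
      if !db.contains key || !da.contains key then paths ++ [pvPath prefix_ key]
      else paths ++ pvLeafDiff (db.getD key 0) (da.getD key 0) (pvPath prefix_ key))
    []

-- ===== PORT B =====
-- Source B's while loop over the two sorted key lists: three branches (only-left / only-right / both),
-- emissions passed in as eL / eB / eR
def pvMerge (eL eB eR : String → List String) : List String → List String → List String
  | [], [] => []
  | a :: as, [] => eL a ++ pvMerge eL eB eR as []
  | [], b :: bs => eR b ++ pvMerge eL eB eR [] bs
  | a :: as, b :: bs =>
    if a < b then eL a ++ pvMerge eL eB eR as (b :: bs)
    else if b < a then eR b ++ pvMerge eL eB eR (a :: as) bs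
    else eB a ++ pvMerge eL eB eR as bs
  termination_by as bs => as.length + bs.length

def diff_paths_py_alt (before : List (String × Int)) (after : List (String × Int)) (prefix_ : String) : List String :=
  let db := PySem.Dict.ofList before
  let da := PySem.Dict.ofList after
  let ka := PySem.List.sorted db.keys (fun k => k)   -- sorted(before)
  let kb := PySem.List.sorted da.keys (fun k => k)   -- sorted(after)
  pvMerge
    (fun k => [pvPath prefix_ k])
    (fun k => pvLeafDiff (db.getD k 0) (da.getD k 0) (pvPath prefix_ k))
    (fun k => [pvPath prefix_ k])
    ka kb

-- ===== PRECONDITION & SPEC =====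
def Spec_diff_paths_py (before : List (String × Int)) (after : List (String × Int)) (prefix_ : String) (out : List String) : Prop := out = diff_paths_py_alt before after prefix_
instance (before : List (String × Int)) (after : List (String × Int)) (prefix_ : String) (out : List String) : Decidable (Spec_diff_paths_py before after prefix_ out) := by unfold Spec_diff_paths_py; infer_instance

-- ===== CLAIM (what is proved, stated in full; the proofs are below) =====
def Claim_equal_diff_paths_py : Prop := ∀ (before : List (String × Int)) (after : List (String × Int)) (prefix_ : String), Dom_diff_paths_py before after prefix_ → Spec_diff_paths_py before after prefix_ (diff_paths_py before after prefix_)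

-- ===== LEMMAS AND PROOFS =====

-- the key sequence pvMerge walks (same three-way comparison, emitting the key itself)
def pvKeyMerge : List String → List String → List String
  | [], [] => []
  | a :: as, [] => a :: pvKeyMerge as []
  | [], b :: bs => b :: pvKeyMerge [] bs
  | a :: as, b :: bs =>
    if a < b then a :: pvKeyMerge as (b :: bs)
    else if b < a then b :: pvKeyMerge (a :: as) bs
    else a :: pvKeyMerge as bs
  termination_by as bs => as.length + bs.length

lemma pv_mem_keyMerge (as bs : List String) (x : String) :
    x ∈ pvKeyMerge as bs ↔ x ∈ as ∨ x ∈ bs := by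
  induction as, bs using pvKeyMerge.induct with
  | case1 => simp [pvKeyMerge]
  | case2 a as ih => simp [pvKeyMerge, ih]
  | case3 b bs ih => simp [pvKeyMerge, ih]
  | case4 a as b bs h ih =>
    simp [pvKeyMerge, h, ih]; tauto
  | case5 a as b bs h h' ih =>
    simp [pvKeyMerge, h, h', ih]; tauto
  | case6 a as b bs h h' ih =>
    have hab : a = b := le_antisymm (not_lt.mp h') (not_lt.mp h)
    simp [pvKeyMerge, ih, hab]; tauto

lemma pv_pairwise_keyMerge (as bs : List String)
    (ha : as.Pairwise (· < ·)) (hb : bs.Pairwise (· < ·)) :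
    (pvKeyMerge as bs).Pairwise (· < ·) := by
  induction as, bs using pvKeyMerge.induct with
  | case1 => simp [pvKeyMerge]
  | case2 a as ih =>
    rw [List.pairwise_cons] at ha
    simp only [pvKeyMerge, List.pairwise_cons]
    refine ⟨fun x hx => ?_, ih ha.2 hb⟩
    rcases (pv_mem_keyMerge _ _ _).mp hx with h | h
    · exact ha.1 x h
    · simp at h
  | case3 b bs ih =>
    rw [List.pairwise_cons] at hb
    simp only [pvKeyMerge, List.pairwise_cons]
    refine ⟨fun x hx => ?_, ih ha hb.2⟩
    rcases (pv_mem_keyMerge _ _ _).mp hx with h | h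
    · simp at h
    · exact hb.1 x h
  | case4 a as b bs h ih =>
    rw [List.pairwise_cons] at ha
    simp only [pvKeyMerge, h, if_true, List.pairwise_cons]
    refine ⟨fun x hx => ?_, ih ha.2 hb⟩
    rcases (pv_mem_keyMerge _ _ _).mp hx with hm | hm
    · exact ha.1 x hm
    · rcases List.mem_cons.mp hm with rfl | hm
      · exact h
      · exact lt_trans h ((List.pairwise_cons.mp hb).1 x hm)
  | case5 a as b bs h h' ih =>
    rw [List.pairwise_cons] at hb
    simp only [pvKeyMerge, h, h', if_false, if_true, List.pairwise_cons]
    refine ⟨fun x hx => ?_, ih ha hb.2⟩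
    rcases (pv_mem_keyMerge _ _ _).mp hx with hm | hm
    · rcases List.mem_cons.mp hm with rfl | hm
      · exact h'
      · exact lt_trans h' ((List.pairwise_cons.mp ha).1 x hm)
    · exact hb.1 x hm
  | case6 a as b bs h h' ih =>
    have hab : a = b := le_antisymm (not_lt.mp h') (not_lt.mp h)
    rw [List.pairwise_cons] at ha; rw [List.pairwise_cons] at hb
    simp only [pvKeyMerge, h, h', if_false, List.pairwise_cons]
    refine ⟨fun x hx => ?_, ih ha.2 hb.2⟩
    rcases (pv_mem_keyMerge _ _ _).mp hx with hm | hm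
    · exact ha.1 x hm
    · exact hab ▸ hb.1 x hm

lemma pv_merge_eq_flatMap (eL eB eR : String → List String) (as bs : List String)
    (ha : as.Pairwise (· < ·)) (hb : bs.Pairwise (· < ·)) :
    pvMerge eL eB eR as bs =
      (pvKeyMerge as bs).flatMap
        (fun k => if k ∈ bs then (if k ∈ as then eB k else eR k) else eL k) := by
  induction as, bs using pvKeyMerge.induct with
  | case1 => simp [pvMerge, pvKeyMerge]
  | case2 a as ih =>
    rw [List.pairwise_cons] at ha
    rw [pvMerge, pvKeyMerge, List.flatMap_cons, ih ha.2 hb]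
    simp
  | case3 b bs ih =>
    rw [List.pairwise_cons] at hb
    rw [pvMerge, pvKeyMerge, List.flatMap_cons, ih ha hb.2]
    congr 1
    · simp
    · apply List.flatMap_congr
      intro k hk
      have hk' : k ∈ bs := by
        rcases (pv_mem_keyMerge _ _ _).mp hk with h | h
        · simp at h
        · exact h
      simp [hk']
  | case4 a as b bs h ih =>
    rw [List.pairwise_cons] at ha
    have hanb : a ∉ b :: bs := by
      intro hm
      rcases List.mem_cons.mp hm with rfl | hm
      · exact lt_irrefl a h
      · exact absurd (lt_trans h ((List.pairwise_cons.mp hb).1 a hm)) (lt_irrefl a)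
    simp only [pvMerge, pvKeyMerge, h, if_true, List.flatMap_cons]
    rw [if_neg hanb]
    rw [ih ha.2 hb]
    congr 1
    apply List.flatMap_congr
    intro k hk
    have hka : k ≠ a := by
      rcases (pv_mem_keyMerge _ _ _).mp hk with hm | hm
      · exact fun hEq => absurd (ha.1 k hm) (by rw [hEq]; exact lt_irrefl a)
      · intro hEq; exact hanb (hEq ▸ hm)
    simp [List.mem_cons, hka]
  | case5 a as b bs h h' ih =>
    rw [List.pairwise_cons] at hb
    have hbna : b ∉ a :: as := by
      intro hm
      rcases List.mem_cons.mp hm with rfl | hm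
      · exact lt_irrefl b h'
      · exact absurd (lt_trans h' ((List.pairwise_cons.mp ha).1 b hm)) (lt_irrefl b)
    simp only [pvMerge, pvKeyMerge, h, h', if_false, if_true, List.flatMap_cons]
    rw [if_pos (List.mem_cons_self), if_neg hbna]
    rw [ih ha hb.2]
    congr 1
    apply List.flatMap_congr
    intro k hk
    have hkb : k ≠ b := by
      rcases (pv_mem_keyMerge _ _ _).mp hk with hm | hm
      · intro hEq; exact hbna (hEq ▸ hm)
      · exact fun hEq => absurd (hb.1 k hm) (by rw [hEq]; exact lt_irrefl b)
    simp [List.mem_cons, hkb]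
  | case6 a as b bs h h' ih =>
    have hab : a = b := le_antisymm (not_lt.mp h') (not_lt.mp h)
    rw [List.pairwise_cons] at ha; rw [List.pairwise_cons] at hb
    have hana : a ∉ as := fun hm => absurd (ha.1 a hm) (lt_irrefl a)
    have hanb : a ∉ bs := fun hm => absurd (hb.1 a (hab ▸ hm)) (hab ▸ lt_irrefl a)
    simp only [pvMerge, pvKeyMerge, h, h', if_false, List.flatMap_cons]
    rw [if_pos (by rw [hab]; exact List.mem_cons_self), if_pos List.mem_cons_self]
    rw [ih ha.2 hb.2]
    congr 1
    apply List.flatMap_congr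
    intro k hk
    have hka : k ≠ a := by
      rcases (pv_mem_keyMerge _ _ _).mp hk with hm | hm
      · exact fun hEq => hana (hEq ▸ hm)
      · exact fun hEq => hanb (hEq ▸ hm)
    have hkb : k ≠ b := hab ▸ hka
    simp [List.mem_cons, hka, hkb]

-- Pairwise ≤ plus Nodup gives Pairwise <
lemma pv_pairwise_lt_of_le_nodup (l : List String)
    (hle : l.Pairwise (· ≤ ·)) (hnd : l.Nodup) : l.Pairwise (· < ·) :=
  (hle.and hnd).imp (fun h => lt_of_le_of_ne h.1 h.2)

-- sorted(d.keys) is strictly increasing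
lemma pv_sorted_keys_strict (l : List (String × Int)) :
    (PySem.List.sorted (PySem.Dict.ofList l).keys (fun k => k)).Pairwise (· < ·) := by
  apply pv_pairwise_lt_of_le_nodup
  · exact PySem.List.sorted_pairwise _ _
  · exact (PySem.List.sorted_perm _ _ _).symm.nodup (PySem.Dict.nodup_keys_ofList l)

lemma pv_foldl_if_append {α β : Type} (p : α → Bool) (f g : α → List β) (l : List α) (acc : List β) :
    l.foldl (fun s x => if p x then s ++ f x else s ++ g x) acc
      = acc ++ l.flatMap (fun x => if p x then f x else g x) := by
  have h : (fun (s : List β) x => if p x then s ++ f x else s ++ g x)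
      = fun s x => s ++ (if p x then f x else g x) := by
    funext s x; split <;> rfl
  rw [h, PySem.List.foldl_append_eq_flatMap]

-- sorted(set(before) | set(after)) is exactly the key sequence the merge walks
lemma pv_sorted_union_eq_keyMerge (before after : List (String × Int)) :
    PySem.List.sorted
        ((PySem.Set.ofList (PySem.Dict.ofList before).keys).union
          (PySem.Set.ofList (PySem.Dict.ofList after).keys)) (fun k => k)
      = pvKeyMerge (PySem.List.sorted (PySem.Dict.ofList before).keys (fun k => k))
          (PySem.List.sorted (PySem.Dict.ofList after).keys (fun k => k)) := by
  apply PySem.List.sorted_eq_of_perm_of_pairwise_lt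
  · rw [List.perm_ext_iff_of_nodup]
    · intro x
      rw [pv_mem_keyMerge]
      simp [PySem.List.mem_sorted, PySem.Set.mem_union, PySem.Set.mem_ofList]
    · exact (pv_pairwise_keyMerge _ _ (pv_sorted_keys_strict before)
        (pv_sorted_keys_strict after)).imp ne_of_lt
    · exact PySem.Set.nodup_union _ _ (PySem.Set.nodup_ofList _)
  · exact pv_pairwise_keyMerge _ _ (pv_sorted_keys_strict before) (pv_sorted_keys_strict after)

-- ===== VERDICT (by name: the statement is the Claim_ definition above) =====
theorem diff_paths_py_spec : Claim_equal_diff_paths_py := by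
  intro before after prefix_ _
  simp only [Spec_diff_paths_py, diff_paths_py, diff_paths_py_alt]
  rw [pv_foldl_if_append, pv_sorted_union_eq_keyMerge,
    pv_merge_eq_flatMap _ _ _ _ _ (pv_sorted_keys_strict before) (pv_sorted_keys_strict after),
    List.nil_append]
  apply List.flatMap_congr
  intro k hk
  rw [pv_mem_keyMerge] at hk
  by_cases hka : k ∈ (PySem.Dict.ofList before).keys <;>
    by_cases hkb : k ∈ (PySem.Dict.ofList after).keys <;>
      simp [PySem.List.mem_sorted, PySem.Dict.contains_iff_mem_keys, hka, hkb] at hk ⊢
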